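-- pv_equiv track=rewrite | github.com/MinhHaDuong/Oeconomia-Climate-finance | tests/test_select_label_terms.py | _merge_unigram_pairs
-- ===== SOURCE A (Python) =====
-- def _merge_unigram_pairs(scored, used_tokens, bigram_dist, unigram_dist):
--     """Merge adjacent unigram pairs into bigrams where stronger."""
--     merged_flag = True
--     while merged_flag:
--         merged_flag = False
--         for i, a in enumerate(scored):
--             if " " in a:
--                 continue
--             for j, b in enumerate(scored):
--                 if j <= i or " " in b:
--                     continue
--                 for bigram in (f"{a} {b}", f"{b} {a}"):
--                     if bigram not in bigram_dist:
--                         continue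
--                     weaker = min(unigram_dist.get(a, 0), unigram_dist.get(b, 0))
--                     if bigram_dist[bigram] >= weaker:
--                         scored[i] = bigram
--                         scored.pop(j)
--                         used_tokens.update(bigram.split())
--                         merged_flag = True
--                         break
--                 if merged_flag:
--                     break
--             if merged_flag:
--                 break
--     return scored, used_tokens
-- ===== SOURCE B (Python) =====
-- def _merge_unigram_pairs(scored, used_tokens, bigram_dist, unigram_dist):
--     """Merge adjacent unigram pairs into bigrams where stronger.
--
--     Single forward pass: the merge test depends only on the two token strings,
--     so a pair rejected once stays rejected and no outer restart loop is needed.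
--     """
--     i = 0
--     while i < len(scored):
--         a = scored[i]
--         if " " not in a:
--             j = i + 1
--             while j < len(scored):
--                 b = scored[j]
--                 if " " in b:
--                     j += 1
--                     continue
--                 merged = None
--                 for bigram in (a + " " + b, b + " " + a):
--                     if bigram in bigram_dist and bigram_dist[bigram] >= min(
--                         unigram_dist.get(a, 0), unigram_dist.get(b, 0)
--                     ):
--                         merged = bigram
--                         break
--                 if merged is not None:
--                     scored[i] = merged
--                     del scored[j]
--                     used_tokens.update(merged.split())
--                     break
--                 j += 1
--         i += 1
--     return scored, used_tokens
-- ===== Notes on version B (the rewrite author's own statement) =====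
-- stated objective: alternative
-- what changed: Replaced A's restart-from-scratch outer while loop (rescan all pairs after every merge) by a single forward pass with no restart: the merge test depends only on the two token strings, so a rejected pair stays rejected and no new merge opportunities appear behind the cursor.
import Mathlib
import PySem

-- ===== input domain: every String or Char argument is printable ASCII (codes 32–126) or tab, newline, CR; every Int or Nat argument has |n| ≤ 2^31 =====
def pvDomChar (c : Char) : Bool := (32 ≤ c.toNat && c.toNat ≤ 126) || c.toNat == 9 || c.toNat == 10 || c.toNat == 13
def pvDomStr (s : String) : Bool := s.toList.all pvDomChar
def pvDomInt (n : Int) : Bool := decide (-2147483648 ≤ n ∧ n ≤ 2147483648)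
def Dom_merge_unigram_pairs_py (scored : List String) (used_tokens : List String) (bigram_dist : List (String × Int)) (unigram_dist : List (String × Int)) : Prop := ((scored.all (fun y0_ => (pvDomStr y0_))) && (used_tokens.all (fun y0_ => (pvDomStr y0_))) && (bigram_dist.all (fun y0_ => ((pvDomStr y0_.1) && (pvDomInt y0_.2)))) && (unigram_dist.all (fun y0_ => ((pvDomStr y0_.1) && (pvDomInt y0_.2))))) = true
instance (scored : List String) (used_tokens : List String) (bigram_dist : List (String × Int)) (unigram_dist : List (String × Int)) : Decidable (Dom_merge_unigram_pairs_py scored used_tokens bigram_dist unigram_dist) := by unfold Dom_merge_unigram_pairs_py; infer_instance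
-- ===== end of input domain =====

-- B replaces A's restart-the-whole-scan outer while loop by a single forward pass (the merge
-- test depends only on the two token strings, so a rejected pair stays rejected); in Python
-- both mutate `scored`/`used_tokens` identically, and the claim is about the returned values.

-- ===== PORT A =====
-- the tuple (f"{a} {b}", f"{b} {a}")
def pvA_cands (a b : String) : List String := [PySem.Str.join " " [a, b], PySem.Str.join " " [b, a]]

-- 'for bigram in (…): if bigram not in bigram_dist: continue; …; if …: break'
def pvA_tryBigrams (bd ud : PySem.Dict String Int) (a b : String) : List String → Option String
  | [] => none
  | bg :: rest =>
    if bd.contains bg then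
      let weaker := min (ud.getD a 0) (ud.getD b 0)
      if bd.getD bg 0 ≥ weaker then some bg else pvA_tryBigrams bd ud a b rest
    else pvA_tryBigrams bd ud a b rest

-- 'for j, b in enumerate(scored): if j <= i or " " in b: continue; …'
def pvA_loopJ (bd ud : PySem.Dict String Int) (i : Int) (a : String) : List (Int × String) → Option (Int × String)
  | [] => none
  | (j, b) :: rest =>
    if j ≤ i || PySem.Str.isIn " " b then pvA_loopJ bd ud i a rest
    else
      match pvA_tryBigrams bd ud a b (pvA_cands a b) with
      | some bg => some (j, bg)
      | none => pvA_loopJ bd ud i a rest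

-- 'for i, a in enumerate(scored): if " " in a: continue; …'
def pvA_loopI (bd ud : PySem.Dict String Int) (scored : List String) : List (Int × String) → Option (Int × Int × String)
  | [] => none
  | (i, a) :: rest =>
    if PySem.Str.isIn " " a then pvA_loopI bd ud scored rest
    else
      match pvA_loopJ bd ud i a (PySem.List.enumerate scored 0) with
      | some (j, bg) => some (i, j, bg)
      | none => pvA_loopI bd ud scored rest

-- 'while merged_flag:' — every merge shortens scored by one, so length+1 rounds always suffice
def pvA_while (bd ud : PySem.Dict String Int) : Nat → List String → PySem.Set String → List String × List String
  | 0, scored, used => (scored, used)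
  | fuel + 1, scored, used =>
    match pvA_loopI bd ud scored (PySem.List.enumerate scored 0) with
    | none => (scored, used)
    | some (i, j, bg) =>
        -- scored[i] = bigram, then scored.pop(j); the indices found are always in range
        match PySem.List.pop? (PySem.List.pySetD scored i bg) j with
        | some (_, rest) => pvA_while bd ud fuel rest (PySem.Set.update used (PySem.Str.split₀ bg))
        | none => (scored, used)

def merge_unigram_pairs_py (scored : List String) (used_tokens : List String) (bigram_dist : List (String × Int)) (unigram_dist : List (String × Int)) : List String × List String :=
  pvA_while (PySem.Dict.ofList bigram_dist) (PySem.Dict.ofList unigram_dist)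
    (scored.length + 1) scored used_tokens

-- ===== PORT B =====
-- 'for bigram in (a + " " + b, b + " " + a): if bigram in bigram_dist and …: merged = bigram; break'
def pvB_findBigram (bd ud : PySem.Dict String Int) (a b : String) : List String → Option String
  | [] => none
  | bg :: rest =>
    if bd.contains bg && decide (bd.getD bg 0 ≥ min (ud.getD a 0) (ud.getD b 0)) then some bg
    else pvB_findBigram bd ud a b rest

-- inner 'while j < len(scored):'
def pvB_scanJ (bd ud : PySem.Dict String Int) (a : String) (scored : List String) (j : Nat) : Option (Nat × String) :=
  if h : j < scored.length then
    let b := scored[j]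
    if PySem.Str.isIn " " b then pvB_scanJ bd ud a scored (j+1)
    else
      match pvB_findBigram bd ud a b [PySem.Str.join " " [a, b], PySem.Str.join " " [b, a]] with
      | some bg => some (j, bg)
      | none => pvB_scanJ bd ud a scored (j+1)
  else none
termination_by scored.length - j

-- outer 'while i < len(scored):'
def pvB_pass (bd ud : PySem.Dict String Int) (scored : List String) (used : PySem.Set String) (i : Nat) : List String × List String :=
  if h : i < scored.length then
    let a := scored[i]
    if PySem.Str.isIn " " a then pvB_pass bd ud scored used (i+1)
    else
      match pvB_scanJ bd ud a scored (i+1) with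
      | none => pvB_pass bd ud scored used (i+1)
      | some (j, bg) =>
          pvB_pass bd ud ((scored.set i bg).eraseIdx j)
            (PySem.Set.update used (PySem.Str.split₀ bg)) (i+1)
  else (scored, used)
termination_by scored.length + (scored.length - i)
decreasing_by
  · omega
  · omega
  · have h1 : ((scored.set i bg).eraseIdx j).length ≤ (scored.set i bg).length :=
      List.length_eraseIdx_le _ _
    simp only [List.length_set] at h1
    omega

def merge_unigram_pairs_py_alt (scored : List String) (used_tokens : List String) (bigram_dist : List (String × Int)) (unigram_dist : List (String × Int)) : List String × List String :=
  pvB_pass (PySem.Dict.ofList bigram_dist) (PySem.Dict.ofList unigram_dist)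
    scored used_tokens 0

-- ===== PRECONDITION & SPEC =====
def Spec_merge_unigram_pairs_py (scored : List String) (used_tokens : List String) (bigram_dist : List (String × Int)) (unigram_dist : List (String × Int)) (out : List String × List String) : Prop := out = merge_unigram_pairs_py_alt scored used_tokens bigram_dist unigram_dist
instance (scored : List String) (used_tokens : List String) (bigram_dist : List (String × Int)) (unigram_dist : List (String × Int)) (out : List String × List String) : Decidable (Spec_merge_unigram_pairs_py scored used_tokens bigram_dist unigram_dist out) := by unfold Spec_merge_unigram_pairs_py; infer_instance

-- ===== CLAIM (what is proved, stated in full; the proofs are below) =====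
def Claim_equal_merge_unigram_pairs_py : Prop := ∀ (scored : List String) (used_tokens : List String) (bigram_dist : List (String × Int)) (unigram_dist : List (String × Int)), Dom_merge_unigram_pairs_py scored used_tokens bigram_dist unigram_dist → Spec_merge_unigram_pairs_py scored used_tokens bigram_dist unigram_dist (merge_unigram_pairs_py scored used_tokens bigram_dist unigram_dist)

-- ===== LEMMAS AND PROOFS =====

-- row p of scored can never merge again: it already is a bigram, or every later row is a
-- bigram or fails the pair test against it
def pvDone (bd ud : PySem.Dict String Int) (scored : List String) (p : Nat) : Prop :=
  ∀ (hp : p < scored.length),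
    PySem.Str.isIn " " scored[p] = true ∨
    ∀ q, p < q → (hq : q < scored.length) →
      PySem.Str.isIn " " scored[q] = true ∨
      pvB_findBigram bd ud scored[p] scored[q]
        [PySem.Str.join " " [scored[p], scored[q]], PySem.Str.join " " [scored[q], scored[p]]] = none

theorem pv_try_eq (bd ud : PySem.Dict String Int) (a b : String) (l : List String) :
    pvA_tryBigrams bd ud a b l = pvB_findBigram bd ud a b l := by
  induction l with
  | nil => rfl
  | cons bg rest ih =>
    simp only [pvA_tryBigrams, pvB_findBigram, Bool.and_eq_true, decide_eq_true_eq]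
    by_cases h1 : bd.contains bg = true <;> by_cases h2 : bd.getD bg 0 ≥ min (ud.getD a 0) (ud.getD b 0) <;>
      simp [h1, h2, ih]

theorem pv_space_join (a b : String) :
    PySem.Str.isIn " " (PySem.Str.join " " [a, b]) = true := by
  rw [PySem.Str.isIn_eq, PySem.Chars.isIn_iff_infix, PySem.Str.toList_join]
  simp only [List.map_cons, List.map_nil, PySem.Chars.join_cons_cons, PySem.Chars.join_singleton]
  exact ⟨a.toList, b.toList, by simp⟩

theorem pv_scanJ_none_iff (bd ud : PySem.Dict String Int) (a : String) (scored : List String) (k : Nat) :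
    pvB_scanJ bd ud a scored k = none ↔
      ∀ q, k ≤ q → (hq : q < scored.length) →
        PySem.Str.isIn " " scored[q] = true ∨
        pvB_findBigram bd ud a scored[q] [PySem.Str.join " " [a, scored[q]], PySem.Str.join " " [scored[q], a]] = none := by
  fun_induction pvB_scanJ bd ud a scored k with
  | case1 j hj b hsp ih =>
    rw [ih]
    constructor
    · intro h q hkq hq
      rcases Nat.eq_or_lt_of_le hkq with rfl | hlt
      · exact Or.inl hsp
      · exact h q hlt hq
    · intro h q hkq hq; exact h q (by omega) hq
  | case2 j hj b hsp bg hfb =>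
    simp only [reduceCtorEq, false_iff]
    intro h
    rcases h j le_rfl hj with hc | hc
    · exact absurd hc hsp
    · rw [hc] at hfb; cases hfb
  | case3 j hj b hsp hfb ih =>
    rw [ih]
    constructor
    · intro h q hkq hq
      rcases Nat.eq_or_lt_of_le hkq with rfl | hlt
      · exact Or.inr hfb
      · exact h q hlt hq
    · intro h q hkq hq; exact h q (by omega) hq
  | case4 j hj => simp; intro q hkq hq; omega

theorem pv_scanJ_some (bd ud : PySem.Dict String Int) (a : String) (scored : List String) (k j : Nat) (bg : String)
    (h : pvB_scanJ bd ud a scored k = some (j, bg)) :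
    k ≤ j ∧ ∃ (hj : j < scored.length),
      bg ∈ [PySem.Str.join " " [a, scored[j]], PySem.Str.join " " [scored[j], a]] := by
  fun_induction pvB_scanJ bd ud a scored k with
  | case1 j' hj' b hsp ih =>
    obtain ⟨h1, h2⟩ := ih h
    exact ⟨by omega, h2⟩
  | case2 j' hj' b hsp bg' hfb =>
    obtain ⟨rfl, rfl⟩ : j' = j ∧ bg' = bg := by
      simpa using h
    refine ⟨le_rfl, hj', ?_⟩
    have : ∀ l, pvB_findBigram bd ud a b l = some bg' → bg' ∈ l := by
      intro l
      induction l with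
      | nil => intro hh; cases hh
      | cons x xs ihx =>
        intro hh
        rw [pvB_findBigram] at hh
        split at hh
        · simp at hh; simp [hh]
        · simp [ihx hh]
    exact this _ hfb
  | case3 j' hj' b hsp hfb ih =>
    obtain ⟨h1, h2⟩ := ih h
    exact ⟨by omega, h2⟩
  | case4 j' hj' => cases h

theorem pv_loopJ_tail (bd ud : PySem.Dict String Int) (scored : List String) (i : Nat) (a : String) :
    ∀ n k, scored.length - k ≤ n → i < k →
      pvA_loopJ bd ud (i : Int) a (PySem.List.enumerate (scored.drop k) (k : Int)) =
        (pvB_scanJ bd ud a scored k).map (fun r => ((r.1 : Int), r.2)) := by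
  intro n
  induction n with
  | zero =>
    intro k hle _
    rw [List.drop_eq_nil_of_le (by omega), PySem.List.enumerate_nil, pvA_loopJ,
      pvB_scanJ, dif_neg (by omega)]
    rfl
  | succ n ih =>
    intro k hle hik
    by_cases hk : k < scored.length
    · rw [List.drop_eq_getElem_cons hk, PySem.List.enumerate_cons, pvA_loopJ]
      have hdec : (decide ((k : Int) ≤ (i : Int)) || PySem.Str.isIn " " scored[k]) = PySem.Str.isIn " " scored[k] := by
        have : ¬ ((k : Int) ≤ (i : Int)) := by exact_mod_cast Nat.not_le.mpr hik
        simp [this]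
      rw [pvB_scanJ, dif_pos hk]
      by_cases hsp : PySem.Str.isIn " " scored[k] = true
      · rw [hdec, if_pos hsp, if_pos hsp]
        have := ih (k+1) (by omega) (by omega)
        rw [← this]
        norm_num
      · rw [hdec, if_neg hsp, if_neg hsp, pv_try_eq]
        have := ih (k+1) (by omega) (by omega)
        cases hfb : pvB_findBigram bd ud a scored[k] [PySem.Str.join " " [a, scored[k]], PySem.Str.join " " [scored[k], a]] with
        | none =>
          simp only [pvA_cands, hfb, ← this]
          norm_num
        | some bg => simp [pvA_cands, hfb]
    · rw [List.drop_eq_nil_of_le (by omega), PySem.List.enumerate_nil, pvA_loopJ,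
        pvB_scanJ, dif_neg hk]
      rfl

theorem pv_loopJ_skip (bd ud : PySem.Dict String Int) (scored : List String) (i : Nat) (a : String) :
    ∀ n k, (i+1) - k ≤ n → k ≤ i+1 →
      pvA_loopJ bd ud (i : Int) a (PySem.List.enumerate (scored.drop k) (k : Int)) =
        pvA_loopJ bd ud (i : Int) a (PySem.List.enumerate (scored.drop (i+1)) ((i+1 : Nat) : Int)) := by
  intro n
  induction n with
  | zero =>
    intro k hle hk
    have : k = i + 1 := by omega
    rw [this]
  | succ n ih =>
    intro k hle hk
    rcases Nat.eq_or_lt_of_le hk with rfl | hlt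
    · rfl
    · by_cases hklen : k < scored.length
      · rw [List.drop_eq_getElem_cons hklen, PySem.List.enumerate_cons, pvA_loopJ]
        have hdec : (decide ((k : Int) ≤ (i : Int)) || PySem.Str.isIn " " scored[k]) = true := by
          have : (k : Int) ≤ (i : Int) := by exact_mod_cast Nat.lt_succ_iff.mp hlt
          simp [this]
        rw [hdec, if_pos rfl]
        have := ih (k+1) (by omega) (by omega)
        norm_num at this ⊢
        exact this
      · rw [List.drop_eq_nil_of_le (by omega), List.drop_eq_nil_of_le (by omega),
          PySem.List.enumerate_nil, PySem.List.enumerate_nil]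

theorem pv_loopJ_eq_scanJ (bd ud : PySem.Dict String Int) (scored : List String) (i : Nat) (a : String) :
    pvA_loopJ bd ud (i : Int) a (PySem.List.enumerate scored 0) =
      (pvB_scanJ bd ud a scored (i+1)).map (fun r => ((r.1 : Int), r.2)) := by
  have h0 : PySem.List.enumerate scored 0 = PySem.List.enumerate (scored.drop 0) ((0 : Nat) : Int) := by
    norm_num
  rw [h0, pv_loopJ_skip bd ud scored i a (i+1) 0 (by omega) (by omega),
    pv_loopJ_tail bd ud scored i a scored.length (i+1) (by omega) (by omega)]

theorem pv_loopI_skip (bd ud : PySem.Dict String Int) (scored : List String) (i : Nat) :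
    ∀ n k, k ≤ i → i - k ≤ n →
      (∀ p, k ≤ p → p < i → pvDone bd ud scored p) →
      pvA_loopI bd ud scored (PySem.List.enumerate (scored.drop k) (k : Int)) =
        pvA_loopI bd ud scored (PySem.List.enumerate (scored.drop i) (i : Int)) := by
  intro n
  induction n with
  | zero =>
    intro k hk hle _
    have : k = i := by omega
    rw [this]
  | succ n ih =>
    intro k hk hle H
    rcases Nat.eq_or_lt_of_le hk with rfl | hlt
    · rfl
    · by_cases hklen : k < scored.length
      · rw [List.drop_eq_getElem_cons hklen, PySem.List.enumerate_cons, pvA_loopI]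
        by_cases hsp : PySem.Str.isIn " " scored[k] = true
        · rw [if_pos hsp]
          have := ih (k+1) (by omega) (by omega) (fun p h1 h2 => H p (by omega) h2)
          norm_num at this ⊢
          exact this
        · rw [if_neg hsp]
          rcases H k le_rfl hlt hklen with hc | hc
          · exact absurd hc hsp
          · have hnone : pvB_scanJ bd ud scored[k] scored (k+1) = none := by
              rw [pv_scanJ_none_iff]
              intro q hkq hq
              exact hc q (by omega) hq
            rw [pv_loopJ_eq_scanJ, hnone]
            have := ih (k+1) (by omega) (by omega) (fun p h1 h2 => H p (by omega) h2)
            norm_num at this ⊢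
            exact this
      · rw [List.drop_eq_nil_of_le (by omega), List.drop_eq_nil_of_le (by omega),
          PySem.List.enumerate_nil, PySem.List.enumerate_nil]

theorem pv_done_merge (bd ud : PySem.Dict String Int) (scored : List String) (i j : Nat) (bg : String)
    (hij : i < j) (hj : j < scored.length) (hbg : PySem.Str.isIn " " bg = true)
    (p : Nat) (hd : p = i ∨ (p < i ∧ pvDone bd ud scored p)) :
    pvDone bd ud ((scored.set i bg).eraseIdx j) p := by
  intro hp
  have hlen : ((scored.set i bg).eraseIdx j).length = scored.length - 1 := by
    rw [List.length_eraseIdx]; simp [hj]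
  have hget : ∀ (q : Nat) (hq : q < ((scored.set i bg).eraseIdx j).length),
      ((scored.set i bg).eraseIdx j)[q] =
        if q < j then (if i = q then bg else scored[q]'(by omega))
        else scored[q+1]'(by omega) := by
    intro q hq
    rw [List.getElem_eraseIdx]
    split
    · rw [List.getElem_set]
    · rename_i hqj
      rw [List.getElem_set, if_neg (by omega : ¬ i = q + 1)]
  rcases hd with rfl | ⟨hpi, hdone⟩
  · left
    rw [hget p hp, if_pos (by omega), if_pos rfl]
    exact hbg
  · have hplen : p < scored.length := by omega
    have hpeq : ((scored.set i bg).eraseIdx j)[p] = scored[p] := by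
      rw [hget p hp, if_pos (by omega), if_neg (by omega)]
    rcases hdone hplen with hsp | hall
    · left; rw [hpeq]; exact hsp
    · right
      intro q hpq hq
      rw [hpeq, hget q hq]
      by_cases hqj : q < j
      · rw [if_pos hqj]
        by_cases hqi : i = q
        · rw [if_pos hqi]; exact Or.inl hbg
        · rw [if_neg hqi]; exact hall q hpq (by omega)
      · rw [if_neg hqj]
        exact hall (q+1) (by omega) (by omega)

theorem pv_main (bd ud : PySem.Dict String Int) :
    ∀ n scored (used : PySem.Set String) i fuel,
      scored.length + (scored.length - i) ≤ n →
      scored.length < fuel →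
      (∀ p, p < i → pvDone bd ud scored p) →
      pvA_while bd ud fuel scored used = pvB_pass bd ud scored used i := by
  intro n
  induction n with
  | zero =>
    intro scored used i fuel hmeas hfuel H
    have hlen : scored.length = 0 := by omega
    obtain rfl : scored = [] := List.length_eq_zero_iff.mp hlen
    obtain ⟨m, rfl⟩ : ∃ m, fuel = m + 1 := ⟨fuel - 1, by omega⟩
    rw [pvA_while, pvB_pass, dif_neg (by simp)]
    rfl
  | succ n ih =>
    intro scored used i fuel hmeas hfuel H
    obtain ⟨m, rfl⟩ : ∃ m, fuel = m + 1 := ⟨fuel - 1, by omega⟩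
    rw [pvB_pass]
    by_cases hi : i < scored.length
    · rw [dif_pos hi]
      show pvA_while bd ud (m+1) scored used =
        (if PySem.Str.isIn " " scored[i] then pvB_pass bd ud scored used (i+1)
         else match pvB_scanJ bd ud scored[i] scored (i+1) with
           | none => pvB_pass bd ud scored used (i+1)
           | some (j, bg) =>
               pvB_pass bd ud ((scored.set i bg).eraseIdx j)
                 (PySem.Set.update used (PySem.Str.split₀ bg)) (i+1))
      by_cases hsp : PySem.Str.isIn " " scored[i] = true
      · rw [if_pos hsp]
        exact ih scored used (i+1) (m+1) (by omega) hfuel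
          (fun p hp => by
            rcases Nat.lt_succ_iff_lt_or_eq.mp hp with h' | rfl
            · exact H p h'
            · intro hplen; exact Or.inl hsp)
      · rw [if_neg hsp]
        cases hscan : pvB_scanJ bd ud scored[i] scored (i+1) with
        | none =>
          have hdone_i : pvDone bd ud scored i := by
            intro hplen
            right
            intro q hiq hq
            exact (pv_scanJ_none_iff bd ud scored[i] scored (i+1)).mp hscan q (by omega) hq
          exact ih scored used (i+1) (m+1) (by omega) hfuel
            (fun p hp => by
              rcases Nat.lt_succ_iff_lt_or_eq.mp hp with h' | rfl
              · exact H p h'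
              · exact hdone_i)
        | some r =>
          obtain ⟨j, bg⟩ := r
          obtain ⟨hij, hj, hmem⟩ := pv_scanJ_some bd ud scored[i] scored (i+1) j bg hscan
          have hbgsp : PySem.Str.isIn " " bg = true := by
            rcases List.mem_cons.mp hmem with rfl | hm
            · exact pv_space_join _ _
            · rcases List.mem_cons.mp hm with rfl | hm'
              · exact pv_space_join _ _
              · cases hm'
          -- A side: the restarted full scan finds exactly (i, j, bg)
          have hloopI : pvA_loopI bd ud scored (PySem.List.enumerate scored 0) =
              some ((i : Int), (j : Int), bg) := by
            have h0 : PySem.List.enumerate scored 0 =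
                PySem.List.enumerate (scored.drop 0) ((0 : Nat) : Int) := by norm_num
            rw [h0, pv_loopI_skip bd ud scored i scored.length 0 (by omega) (by omega)
              (fun p _ hpi => H p hpi)]
            rw [List.drop_eq_getElem_cons hi, PySem.List.enumerate_cons, pvA_loopI,
              if_neg hsp, pv_loopJ_eq_scanJ, hscan]
            rfl
          rw [pvA_while, hloopI]
          have hjlen : j < (scored.set i bg).length := by simpa using hj
          have hpop : PySem.List.pop? (PySem.List.pySetD scored (i : Int) bg) (j : Int) =
              some ((scored.set i bg)[j], (scored.set i bg).eraseIdx j) := by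
            rw [PySem.List.pySetD_natCast, PySem.List.pop?_natCast _ j hjlen]
          dsimp only
          rw [hpop]
          have hlen' : ((scored.set i bg).eraseIdx j).length = scored.length - 1 := by
            rw [List.length_eraseIdx]; simp [hj]
          exact ih ((scored.set i bg).eraseIdx j) (PySem.Set.update used (PySem.Str.split₀ bg))
            (i+1) m (by omega) (by omega)
            (fun p hp => by
              rcases Nat.lt_succ_iff_lt_or_eq.mp hp with h' | rfl
              · exact pv_done_merge bd ud scored i j bg (by omega) hj hbgsp p
                  (Or.inr ⟨h', H p h'⟩)
              · exact pv_done_merge bd ud scored p j bg (by omega) hj hbgsp p (Or.inl rfl))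
    · rw [dif_neg hi]
      have hloopI : pvA_loopI bd ud scored (PySem.List.enumerate scored 0) = none := by
        have h0 : PySem.List.enumerate scored 0 =
            PySem.List.enumerate (scored.drop 0) ((0 : Nat) : Int) := by norm_num
        rw [h0, pv_loopI_skip bd ud scored scored.length scored.length 0 (by omega) (by omega)
          (fun p _ hpl => H p (by omega))]
        rw [List.drop_length, PySem.List.enumerate_nil]
        rfl
      rw [pvA_while, hloopI]

-- ===== VERDICT (by name: the statement is the Claim_ definition above) =====
theorem merge_unigram_pairs_py_spec : Claim_equal_merge_unigram_pairs_py := by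
  intro scored used_tokens bigram_dist unigram_dist _
  unfold Spec_merge_unigram_pairs_py merge_unigram_pairs_py merge_unigram_pairs_py_alt
  exact pv_main _ _ (scored.length + scored.length) scored used_tokens 0 (scored.length + 1)
    (by omega) (by omega) (fun p hp => absurd hp (Nat.not_lt_zero p))
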